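-- pv_equiv track=rewrite | github.com/XinyuZhou-1014/UIUC_homework | 412/PatternMining.py | scanPattern
-- ===== SOURCE A (Python) =====
-- def scanPattern(data, patternList):
--     res = [0] * len(patternList)
--     for ex in data:
--         for i in range(len(patternList)):
--             pattern = patternList[i]
--             if pattern.issubset(ex):
--                 res[i] += 1
--     return res
-- ===== SOURCE B (Python) =====
-- def scanPattern(data, patternList):
--     n = len(patternList)
--     sizes = []
--     pairs = []
--     for i, p in enumerate(patternList):
--         items = set(p)
--         sizes.append(len(items))
--         for x in items:
--             pairs.append((x, i))
--     res = [0] * n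
--     for ex in data:
--         exset = set(ex)
--         hits = [0] * n
--         for x, i in pairs:
--             if x in exset:
--                 hits[i] += 1
--         for i in range(n):
--             if hits[i] == sizes[i]:
--                 res[i] += 1
--     return res
-- ===== Notes on version B (the rewrite author's own statement) =====
-- stated objective: alternative
-- what changed: Replaces A's per-(example,pattern) subset tests by a flattened inverted index of (item, pattern-index) pairs built once; per example a hit counter per pattern index is filled from that pair list against the example's deduplicated item set and compared with the pattern's deduplicated size in a final threshold pass.
import Mathlib
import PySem

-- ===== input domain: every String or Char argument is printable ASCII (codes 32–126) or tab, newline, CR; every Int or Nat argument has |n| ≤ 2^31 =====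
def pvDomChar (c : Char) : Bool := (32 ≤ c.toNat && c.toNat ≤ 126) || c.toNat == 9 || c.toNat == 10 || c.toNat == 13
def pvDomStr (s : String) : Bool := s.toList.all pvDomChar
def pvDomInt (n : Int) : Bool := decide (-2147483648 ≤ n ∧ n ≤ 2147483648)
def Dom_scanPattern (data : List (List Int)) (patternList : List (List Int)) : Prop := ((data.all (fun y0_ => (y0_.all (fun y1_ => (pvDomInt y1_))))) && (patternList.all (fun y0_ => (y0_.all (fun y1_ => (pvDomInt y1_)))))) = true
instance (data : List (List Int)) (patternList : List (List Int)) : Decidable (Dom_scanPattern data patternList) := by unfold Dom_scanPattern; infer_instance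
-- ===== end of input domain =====

-- B replaces A's per-(example,pattern) subset tests by a flattened inverted index:
-- all (item, pattern-index) pairs are listed once; per example a hit counter per pattern
-- is filled from that list and compared with the pattern's deduplicated size (objective: alternative).

-- ===== PORT A =====
-- one inner step: i ranges over range(len(patternList)), so i is a nonnegative in-range index
def stepA (patternList : List (List Int)) (ex : List Int) (res : List Int) (i : Int) : List Int :=
  if PySem.Set.issubset (PySem.List.pyGetD patternList i []) ex then
    PySem.List.pySetD res i (PySem.List.pyGetD res i 0 + 1)
  else res

def scanPattern (data : List (List Int)) (patternList : List (List Int)) : List Int :=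
  data.foldl
    (fun res ex => (PySem.List.pyRange 0 patternList.length 1).foldl (stepA patternList ex) res)
    (List.replicate patternList.length 0)

-- ===== PORT B =====
-- loop body of 'for i, p in enumerate(patternList): items = set(p); sizes.append(len(items)); for x in items: pairs.append((x, i))'
def buildStep (st : List Int × List (Int × Int)) (ip : Int × List Int) : List Int × List (Int × Int) :=
  let items := PySem.Set.ofList ip.2
  (st.1 ++ [(items.length : Int)], items.foldl (fun ps x => ps ++ [(x, ip.1)]) st.2)

-- loop body of one example: exset = set(ex); hits filled from pairs; threshold pass bumps res
def exStep (n : ℕ) (sizes : List Int) (pairs : List (Int × Int)) (res : List Int) (ex : List Int) : List Int :=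
  let exset := PySem.Set.ofList ex
  let hits := pairs.foldl
    (fun h xi => if PySem.Set.contains exset xi.1 then PySem.List.pySetD h xi.2 (PySem.List.pyGetD h xi.2 0 + 1) else h)
    (List.replicate n 0)
  (PySem.List.pyRange 0 (n : Int) 1).foldl
    (fun r i => if PySem.List.pyGetD hits i 0 = PySem.List.pyGetD sizes i 0 then PySem.List.pySetD r i (PySem.List.pyGetD r i 0 + 1) else r)
    res

def scanPattern_alt (data : List (List Int)) (patternList : List (List Int)) : List Int :=
  let n := patternList.length
  let sp := (PySem.List.enumerate patternList 0).foldl buildStep ([], [])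
  data.foldl (exStep n sp.1 sp.2) (List.replicate n 0)

-- ===== PRECONDITION & SPEC =====
def Spec_scanPattern (data : List (List Int)) (patternList : List (List Int)) (out : List Int) : Prop := out = scanPattern_alt data patternList
instance (data : List (List Int)) (patternList : List (List Int)) (out : List Int) : Decidable (Spec_scanPattern data patternList out) := by unfold Spec_scanPattern; infer_instance

-- ===== CLAIM (what is proved, stated in full; the proofs are below) =====
def Claim_equal_scanPattern : Prop := ∀ (data : List (List Int)) (patternList : List (List Int)), Dom_scanPattern data patternList → Spec_scanPattern data patternList (scanPattern data patternList)

-- ===== LEMMAS AND PROOFS =====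

-- generic 'res[i] += 1 if cond(i)' loop over range(m), for m within bounds
theorem bump_fold (cond : Int → Prop) [DecidablePred cond] :
    ∀ (m : ℕ) (res : List Int), m ≤ res.length →
      (PySem.List.pyRange 0 (m : Int) 1).foldl
          (fun r i => if cond i then PySem.List.pySetD r i (PySem.List.pyGetD r i 0 + 1) else r) res
        = (List.range m).map (fun j => res.getD j 0 + if cond (j : Int) then 1 else 0) ++ res.drop m := by
  intro m
  induction m with
  | zero => intro res _; simp
  | succ m ih =>
    intro res hm
    have hm' : m ≤ res.length := Nat.le_of_succ_le hm
    have hmr : m < res.length := hm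
    have hsplit : PySem.List.pyRange 0 ((m + 1 : ℕ) : Int) 1 =
        PySem.List.pyRange 0 (m : Int) 1 ++ [(m : Int)] := by
      push_cast
      exact PySem.List.pyRange_one_succ_right (by positivity)
    rw [hsplit, List.foldl_append, ih res hm']
    set A := (List.range m).map (fun j => res.getD j 0 + if cond (j : Int) then 1 else 0) with hA
    have hAlen : A.length = m := by simp [hA]
    have hdrop : res.drop m = res[m] :: res.drop (m + 1) := List.drop_eq_getElem_cons hmr
    simp only [List.foldl_cons, List.foldl_nil]
    have hget : PySem.List.pyGetD (A ++ res.drop m) (m : Int) 0 = res[m] := by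
      rw [PySem.List.pyGetD_natCast, List.getD_eq_getElem?_getD,
        List.getElem?_append_right (by omega), hdrop, hAlen, Nat.sub_self]
      simp [List.getElem?_eq_getElem hmr]
    have hset : ∀ v, PySem.List.pySetD (A ++ res.drop m) (m : Int) v =
        A ++ v :: res.drop (m + 1) := by
      intro v
      rw [PySem.List.pySetD_natCast, List.set_append, if_neg (by omega), hAlen,
        Nat.sub_self, hdrop, List.set_cons_zero]
    rw [List.range_succ, List.map_append]
    by_cases hc : cond (m : Int)
    · rw [if_pos hc, hset, hget]
      simp [hA, if_pos hc, List.getElem?_eq_getElem hmr]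
    · rw [if_neg hc, hdrop]
      simp [hA, if_neg hc, List.getElem?_eq_getElem hmr]

-- getD after set, for an in-range set index
theorem getD_set_int (l : List Int) (k j : ℕ) (v : Int) (hk : k < l.length) :
    (l.set k v).getD j 0 = if j = k then v else l.getD j 0 := by
  by_cases h : j = k
  · subst h
    simp [List.getD_eq_getElem?_getD, hk]
  · simp [List.getD_eq_getElem?_getD, Ne.symm h, h]

-- the hits loop: length preservation and pointwise characterisation by countP
theorem hits_fold (q : Int → Bool) :
    ∀ (pairs : List (Int × Int)) (h : List Int),
      (∀ xi ∈ pairs, ∃ k : ℕ, xi.2 = (k : Int) ∧ k < h.length) →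
      (pairs.foldl
          (fun h xi => if q xi.1 then PySem.List.pySetD h xi.2 (PySem.List.pyGetD h xi.2 0 + 1) else h) h).length = h.length ∧
      ∀ j : ℕ,
        (pairs.foldl
          (fun h xi => if q xi.1 then PySem.List.pySetD h xi.2 (PySem.List.pyGetD h xi.2 0 + 1) else h) h).getD j 0
        = h.getD j 0 + (pairs.countP (fun xi => q xi.1 && xi.2 == (j : Int)) : Int) := by
  intro pairs
  induction pairs with
  | nil => intro h _; simp
  | cons xi pairs ih =>
    intro h hbound
    obtain ⟨k, hk2, hklt⟩ := hbound xi (List.mem_cons_self)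
    by_cases hq : q xi.1 = true
    · have hstep : (fun h (xi : Int × Int) =>
          if q xi.1 then PySem.List.pySetD h xi.2 (PySem.List.pyGetD h xi.2 0 + 1) else h) h xi
          = h.set k (h.getD k 0 + 1) := by
        simp [hq, hk2, PySem.List.pySetD_natCast, PySem.List.pyGetD_natCast]
      have hlen' : (h.set k (h.getD k 0 + 1)).length = h.length := by simp
      have hbound' : ∀ yi ∈ pairs, ∃ m : ℕ, yi.2 = (m : Int) ∧ m < (h.set k (h.getD k 0 + 1)).length := by
        intro yi hyi
        obtain ⟨m, hm1, hm2⟩ := hbound yi (List.mem_cons_of_mem _ hyi)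
        exact ⟨m, hm1, by omega⟩
      obtain ⟨ihlen, ihval⟩ := ih (h.set k (h.getD k 0 + 1)) hbound'
      constructor
      · simp only [List.foldl_cons, hstep]
        rw [ihlen, hlen']
      · intro j
        simp only [List.foldl_cons, hstep]
        rw [ihval j, getD_set_int h k j _ hklt, List.countP_cons]
        by_cases hjk : j = k
        · subst hjk
          have ht : (q xi.1 && xi.2 == (j : Int)) = true := by
            rw [hk2]
            simp [hq]
          simp [ht]
          ring
        · have hf : (q xi.1 && xi.2 == (j : Int)) = false := by
            rw [hk2]
            simp
            omega
          simp [hf, hjk]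
    · have hstep : (fun h (xi : Int × Int) =>
          if q xi.1 then PySem.List.pySetD h xi.2 (PySem.List.pyGetD h xi.2 0 + 1) else h) h xi = h := by
        simp [hq]
      obtain ⟨ihlen, ihval⟩ := ih h (fun yi hyi => hbound yi (List.mem_cons_of_mem _ hyi))
      constructor
      · simp only [List.foldl_cons, hstep]; exact ihlen
      · intro j
        simp only [List.foldl_cons, hstep]
        rw [ihval j, List.countP_cons]
        simp [hq]

-- the flattened inverted index, as a flatMap
def flatPairs (pl : List (List Int)) (k : Int) : List (Int × Int) :=
  (PySem.List.enumerate pl k).flatMap (fun ip => (PySem.Set.ofList ip.2).map (fun x => (x, ip.1)))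

theorem flatten_map_singleton {α β : Type} (f : α → β) :
    ∀ l : List α, (l.map (fun x => [f x])).flatten = l.map f := by
  intro l
  induction l with
  | nil => simp
  | cons x l ih => simp [ih]

theorem flatPairs_cons (p : List Int) (pl : List (List Int)) (k : Int) :
    flatPairs (p :: pl) k = (PySem.Set.ofList p).map (fun x => (x, k)) ++ flatPairs pl (k + 1) := by
  simp [flatPairs, PySem.List.enumerate_cons]

theorem build_eq :
    ∀ (pl : List (List Int)) (k : Int) (s : List Int) (p : List (Int × Int)),
      (PySem.List.enumerate pl k).foldl buildStep (s, p)
        = (s ++ pl.map (fun q => ((PySem.Set.ofList q).length : Int)), p ++ flatPairs pl k) := by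
  intro pl
  induction pl with
  | nil => intro k s p; simp [flatPairs, PySem.List.enumerate_nil]
  | cons q pl ih =>
    intro k s p
    rw [PySem.List.enumerate_cons, List.foldl_cons]
    have hb : buildStep (s, p) (k, q)
        = (s ++ [((PySem.Set.ofList q).length : Int)], p ++ (PySem.Set.ofList q).map (fun x => (x, k))) := by
      simp [buildStep, flatten_map_singleton]
    rw [hb, ih (k + 1), flatPairs_cons]
    simp

theorem flatPairs_indices :
    ∀ (pl : List (List Int)), ∀ xi ∈ flatPairs pl 0, ∃ k : ℕ, xi.2 = (k : Int) ∧ k < pl.length := by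
  intro pl xi hxi
  simp only [flatPairs, List.mem_flatMap] at hxi
  obtain ⟨ip, hip, hxi'⟩ := hxi
  obtain ⟨x, _, hx⟩ := List.mem_map.mp hxi'
  rw [PySem.List.mem_enumerate_iff] at hip
  obtain ⟨k, hk, hipk⟩ := hip
  refine ⟨k, ?_, hk⟩
  rw [← hx, hipk]
  simp

theorem countP_flatPairs_lt (q : Int → Bool) :
    ∀ (pl : List (List Int)) (m j : ℕ), j < m →
      (flatPairs pl (m : Int)).countP (fun xi => q xi.1 && xi.2 == (j : Int)) = 0 := by
  intro pl
  induction pl with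
  | nil => intro m j _; simp [flatPairs, PySem.List.enumerate_nil]
  | cons p pl ih =>
    intro m j hj
    rw [flatPairs_cons, List.countP_append, List.countP_map]
    have hpred : ((fun xi : Int × Int => q xi.1 && xi.2 == (j : Int)) ∘ fun x => (x, (m : Int)))
        = fun _ => false := by
      funext x
      simp
      omega
    have hblock : ((PySem.Set.ofList p).countP ((fun xi : Int × Int => q xi.1 && xi.2 == (j : Int)) ∘ fun x => (x, (m : Int)))) = 0 := by
      rw [hpred]
      simp
    have hcast : (m : Int) + 1 = ((m + 1 : ℕ) : Int) := by push_cast; ring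
    rw [hblock, hcast, ih (m + 1) j (by omega)]

theorem countP_flatPairs (q : Int → Bool) :
    ∀ (pl : List (List Int)) (m j : ℕ), j < pl.length →
      (flatPairs pl (m : Int)).countP (fun xi => q xi.1 && xi.2 == ((m + j : ℕ) : Int))
        = (PySem.Set.ofList (pl.getD j [])).countP q := by
  intro pl
  induction pl with
  | nil => intro m j hj; simp at hj
  | cons p pl ih =>
    intro m j hj
    rw [flatPairs_cons, List.countP_append, List.countP_map]
    cases j with
    | zero =>
      have hpred : ((fun xi : Int × Int => q xi.1 && xi.2 == ((m + 0 : ℕ) : Int)) ∘ fun x => (x, (m : Int))) = q := by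
        funext x
        simp
      have hblock : ((PySem.Set.ofList p).countP ((fun xi : Int × Int => q xi.1 && xi.2 == ((m + 0 : ℕ) : Int)) ∘ fun x => (x, (m : Int)))) = (PySem.Set.ofList p).countP q := by
        rw [hpred]
      have hcast : (m : Int) + 1 = ((m + 1 : ℕ) : Int) := by push_cast; ring
      have htail : (flatPairs pl ((m + 1 : ℕ) : Int)).countP (fun xi => q xi.1 && xi.2 == ((m + 0 : ℕ) : Int)) = 0 := by
        have := countP_flatPairs_lt q pl (m + 1) (m + 0) (by omega)
        simpa using this
      rw [hblock, hcast, htail]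
      simp
    | succ j =>
      have hpred : ((fun xi : Int × Int => q xi.1 && xi.2 == ((m + (j + 1) : ℕ) : Int)) ∘ fun x => (x, (m : Int)))
          = fun _ => false := by
        funext x
        simp
        omega
      have hblock : ((PySem.Set.ofList p).countP ((fun xi : Int × Int => q xi.1 && xi.2 == ((m + (j + 1) : ℕ) : Int)) ∘ fun x => (x, (m : Int)))) = 0 := by
        rw [hpred]
        simp
      have hcast : (m : Int) + 1 = ((m + 1 : ℕ) : Int) := by push_cast; ring
      have hidx : ((m + (j + 1) : ℕ) : Int) = (((m + 1) + j : ℕ) : Int) := by push_cast; ring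
      rw [hblock, hcast, hidx, ih (m + 1) j (by simpa using hj)]
      simp

theorem getD_replicate_zero (n j : ℕ) : (List.replicate n (0 : Int)).getD j 0 = 0 := by
  rw [List.getD_eq_getElem?_getD, List.getElem?_replicate]
  split <;> simp

-- per-example: B's step equals A's inner loop
theorem exStep_eq (patternList : List (List Int)) (ex : List Int) (res : List Int)
    (hres : res.length = patternList.length) :
    exStep patternList.length (patternList.map (fun q => ((PySem.Set.ofList q).length : Int)))
        (flatPairs patternList 0) res ex
      = (PySem.List.pyRange 0 patternList.length 1).foldl (stepA patternList ex) res := by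
  have hn : patternList.length ≤ res.length := le_of_eq hres.symm
  set n := patternList.length with hn'
  set exset := PySem.Set.ofList ex with hexset
  set sizes := patternList.map (fun q => ((PySem.Set.ofList q).length : Int)) with hsizes
  set pairs := flatPairs patternList 0 with hpairs
  set hits := pairs.foldl
    (fun h xi => if PySem.Set.contains exset xi.1 then PySem.List.pySetD h xi.2 (PySem.List.pyGetD h xi.2 0 + 1) else h)
    (List.replicate n (0 : Int)) with hhits
  have hbound : ∀ xi ∈ pairs, ∃ k : ℕ, xi.2 = (k : Int) ∧ k < (List.replicate n (0 : Int)).length := by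
    intro xi hxi
    obtain ⟨k, h1, h2⟩ := flatPairs_indices patternList xi hxi
    exact ⟨k, h1, by simpa using h2⟩
  have hval : ∀ j : ℕ, hits.getD j 0
      = (List.replicate n (0 : Int)).getD j 0
        + (pairs.countP (fun xi => PySem.Set.contains exset xi.1 && xi.2 == (j : Int)) : Int) :=
    (hits_fold (PySem.Set.contains exset) pairs (List.replicate n (0 : Int)) hbound).2
  have hB : exStep n sizes pairs res ex
      = (List.range n).map (fun j => res.getD j 0
          + if PySem.List.pyGetD hits (j : Int) 0 = PySem.List.pyGetD sizes (j : Int) 0 then 1 else 0)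
        ++ res.drop n := by
    show (PySem.List.pyRange 0 (n : Int) 1).foldl
        (fun r i => if PySem.List.pyGetD hits i 0 = PySem.List.pyGetD sizes i 0 then
          PySem.List.pySetD r i (PySem.List.pyGetD r i 0 + 1) else r) res = _
    exact bump_fold (fun i => PySem.List.pyGetD hits i 0 = PySem.List.pyGetD sizes i 0) n res hn
  have hA : (PySem.List.pyRange 0 (n : Int) 1).foldl (stepA patternList ex) res
      = (List.range n).map (fun j => res.getD j 0
          + if PySem.Set.issubset (PySem.List.pyGetD patternList (j : Int) []) ex then 1 else 0)
        ++ res.drop n :=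
    bump_fold (fun i => PySem.Set.issubset (PySem.List.pyGetD patternList i []) ex = true) n res hn
  rw [hB, hA]
  congr 1
  apply List.map_congr_left
  intro j hj
  have hjn : j < n := List.mem_range.mp hj
  have hpat : PySem.List.pyGetD patternList (j : Int) [] = patternList[j] := by
    rw [PySem.List.pyGetD_natCast]
    exact List.getD_eq_getElem patternList [] hjn
  have hsz : PySem.List.pyGetD sizes (j : Int) 0 = ((PySem.Set.ofList patternList[j]).length : Int) := by
    rw [PySem.List.pyGetD_natCast, hsizes, List.getD_eq_getElem _ 0 (by simpa using hjn)]
    simp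
  have hcount : pairs.countP (fun xi => PySem.Set.contains exset xi.1 && xi.2 == (j : Int))
      = (PySem.Set.ofList patternList[j]).countP (PySem.Set.contains exset) := by
    have := countP_flatPairs (PySem.Set.contains exset) patternList 0 j hjn
    rw [hpairs]
    simpa [List.getElem?_eq_getElem hjn] using this
  have hhit : PySem.List.pyGetD hits (j : Int) 0
      = ((PySem.Set.ofList patternList[j]).countP (PySem.Set.contains exset) : Int) := by
    rw [PySem.List.pyGetD_natCast, hval j, getD_replicate_zero, hcount]
    ring
  have hcond : (PySem.List.pyGetD hits (j : Int) 0 = PySem.List.pyGetD sizes (j : Int) 0)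
      ↔ (PySem.Set.issubset (PySem.List.pyGetD patternList (j : Int) []) ex = true) := by
    rw [hhit, hsz, hpat, PySem.Set.issubset_iff]
    rw [Int.natCast_inj]
    constructor
    · intro hlen x hx
      have hall := List.countP_eq_length.mp hlen
      have hx' : x ∈ PySem.Set.ofList patternList[j] := (PySem.Set.mem_ofList _ _).mpr hx
      have := hall x hx'
      rw [PySem.Set.contains_iff] at this
      rwa [hexset, PySem.Set.mem_ofList _ _] at this
    · intro hsub
      apply List.countP_eq_length.mpr
      intro x hx
      rw [PySem.Set.contains_iff, hexset, PySem.Set.mem_ofList _ _]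
      exact hsub x ((PySem.Set.mem_ofList _ _).mp hx)
  rw [if_congr hcond rfl rfl]

-- the result of either per-example step keeps length n
theorem stepA_length (patternList : List (List Int)) (ex : List Int) (res : List Int)
    (hres : res.length = patternList.length) :
    ((PySem.List.pyRange 0 patternList.length 1).foldl (stepA patternList ex) res).length
      = patternList.length := by
  have h1 : (PySem.List.pyRange 0 (patternList.length : Int) 1).foldl (stepA patternList ex) res
      = (List.range patternList.length).map (fun j => res.getD j 0
          + if PySem.Set.issubset (PySem.List.pyGetD patternList (j : Int) []) ex then 1 else 0)
        ++ res.drop patternList.length :=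
    bump_fold (fun i => PySem.Set.issubset (PySem.List.pyGetD patternList i []) ex = true)
      patternList.length res (le_of_eq hres.symm)
  rw [h1]
  simp [hres]

theorem outer_eq (patternList : List (List Int)) :
    ∀ (data : List (List Int)) (res : List Int), res.length = patternList.length →
      data.foldl
        (fun res ex => (PySem.List.pyRange 0 patternList.length 1).foldl (stepA patternList ex) res) res
      = data.foldl
          (exStep patternList.length (patternList.map (fun q => ((PySem.Set.ofList q).length : Int)))
            (flatPairs patternList 0)) res := by
  intro data
  induction data with
  | nil => intro res _; simp
  | cons ex data ih =>
    intro res hres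
    simp only [List.foldl_cons]
    rw [exStep_eq patternList ex res hres]
    exact ih _ (stepA_length patternList ex res hres)

-- ===== VERDICT (by name: the statement is the Claim_ definition above) =====
theorem scanPattern_spec : Claim_equal_scanPattern := by
  intro data patternList _
  unfold Spec_scanPattern scanPattern scanPattern_alt
  have hsp : (PySem.List.enumerate patternList 0).foldl buildStep ([], [])
      = (patternList.map (fun q => ((PySem.Set.ofList q).length : Int)), flatPairs patternList 0) := by
    rw [build_eq patternList 0 [] []]
    simp
  rw [hsp]
  exact outer_eq patternList data (List.replicate patternList.length 0) (by simp)
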